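-- pv_equiv track=rewrite | github.com/kabirpal/Python | Placement/Setbits.py | largestNum
-- ===== SOURCE A (Python) =====
-- def largestNum(n):
-- 	num = 0
-- 	for i in range(32):
-- 		x = 1 << i
-- 		if (x - 1) <= n:
-- 			num = (1 << i) - 1
-- 		else:
-- 			break
-- 	return num
-- ===== SOURCE B (Python) =====
-- def largestNum(n):
--     if n < 0:
--         return 0
--     i = min(31, (n + 1).bit_length() - 1)
--     return (1 << i) - 1
-- ===== Notes on version B (the rewrite author's own statement) =====
-- stated objective: idiomatic
-- what changed: Replaced the fixed-length shift-and-test loop with a closed form computed directly from bit_length, maintaining no loop state.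
import Mathlib
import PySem

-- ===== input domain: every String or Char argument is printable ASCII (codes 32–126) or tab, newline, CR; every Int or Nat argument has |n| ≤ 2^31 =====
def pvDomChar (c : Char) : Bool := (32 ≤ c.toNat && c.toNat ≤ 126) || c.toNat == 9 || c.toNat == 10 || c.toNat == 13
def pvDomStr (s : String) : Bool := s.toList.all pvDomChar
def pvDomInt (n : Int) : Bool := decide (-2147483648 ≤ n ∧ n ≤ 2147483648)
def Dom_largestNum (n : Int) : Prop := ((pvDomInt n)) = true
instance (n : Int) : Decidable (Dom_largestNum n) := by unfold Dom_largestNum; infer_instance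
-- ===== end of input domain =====

-- B computes the answer in closed form via bit_length instead of A's 32-step loop (idiomatic; return-value equivalence).
-- ===== PORT A =====
-- A's for-loop with break, transliterated as structural recursion over range(32); 1 << i is 2^i (i ≥ 0 in range(32)).
def largestNumLoop (n : Int) : List Int → Int → Int
  | [], num => num
  | i :: rest, num =>
      if (2:Int) ^ i.toNat - 1 ≤ n then largestNumLoop n rest ((2:Int) ^ i.toNat - 1)
      else num

def largestNum (n : Int) : Int := largestNumLoop n (PySem.List.pyRange 0 32 1) 0

-- ===== PORT B =====
-- (m).bit_length() - 1 = Nat.log2 m for m ≥ 1 (here m = n+1 ≥ 1).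
def largestNum_alt (n : Int) : Int :=
  if n < 0 then 0
  else (2:Int) ^ (min 31 (Nat.log2 (n + 1).toNat)) - 1

-- ===== PRECONDITION & SPEC =====
def Spec_largestNum (n : Int) (out : Int) : Prop := out = largestNum_alt n
instance (n : Int) (out : Int) : Decidable (Spec_largestNum n out) := by unfold Spec_largestNum; infer_instance

-- ===== CLAIM (what is proved, stated in full; the proofs are below) =====
def Claim_equal_largestNum : Prop := ∀ (n : Int), Dom_largestNum n → Spec_largestNum n (largestNum n)

-- ===== LEMMAS AND PROOFS =====

-- Once the loop has reached index i ≤ j (j the largest exponent with 2^j ≤ n+1, j ≤ 31),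
-- it ends returning 2^j - 1, regardless of the accumulator it carries in.
theorem loop_reach (n : Int) (j : Nat) (hj : j ≤ 31)
    (h1 : (2:Int) ^ j ≤ n + 1) (h2 : n + 1 < (2:Int) ^ (j + 1)) :
    ∀ d i num, i + d = j →
      largestNumLoop n (PySem.List.pyRange (i : Int) 32 1) num = (2:Int) ^ j - 1 := by
  intro d
  induction d with
  | zero =>
      intro i num hij
      have hij' : i = j := by omega
      subst hij'
      have hlt : (i : Int) < 32 := by exact_mod_cast (by omega : i < 32)
      rw [PySem.List.pyRange_one_cons hlt]
      simp only [largestNumLoop, Int.toNat_natCast]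
      rw [if_pos (by omega)]
      by_cases h31 : i = 31
      · subst h31
        rw [show (((31:Nat) : Int) + 1) = 32 by norm_num,
            PySem.List.pyRange_one_eq_nil (by norm_num)]
        simp [largestNumLoop]
      · have hlt2 : (i : Int) + 1 < 32 := by exact_mod_cast (by omega : i + 1 < 32)
        rw [PySem.List.pyRange_one_cons hlt2]
        simp only [largestNumLoop]
        have : ((i : Int) + 1).toNat = i + 1 := by omega
        rw [this, if_neg (by omega)]
  | succ d ih =>
      intro i num hij
      have hlt : (i : Int) < 32 := by exact_mod_cast (by omega : i < 32)
      rw [PySem.List.pyRange_one_cons hlt]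
      simp only [largestNumLoop, Int.toNat_natCast]
      have hle : (2:Int) ^ i ≤ (2:Int) ^ j :=
        pow_le_pow_right₀ (by norm_num) (by omega)
      rw [if_pos (by omega)]
      have := ih (i + 1) ((2:Int) ^ i - 1) (by omega)
      rwa [Nat.cast_add, Nat.cast_one] at this

-- ===== VERDICT (by name: the statement is the Claim_ definition above) =====
theorem largestNum_spec : Claim_equal_largestNum := by
  intro n hdom
  unfold Spec_largestNum largestNum largestNum_alt
  by_cases hneg : n < 0
  · rw [if_pos hneg, PySem.List.pyRange_one_cons (by norm_num)]
    simp only [largestNumLoop]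
    rw [if_neg (by simpa using hneg.not_ge ∘ fun h => h)]
  · rw [if_neg hneg]
    have hdom' : -2147483648 ≤ n ∧ n ≤ 2147483648 := by
      simpa [Dom_largestNum, pvDomInt] using hdom
    have hn0 : 0 ≤ n := by omega
    set m := (n + 1).toNat with hmdef
    have hm : (m : Int) = n + 1 := Int.toNat_of_nonneg (by omega)
    have hm0 : m ≠ 0 := by omega
    have hm32 : m < 2 ^ 32 := by omega
    have hj31 : Nat.log2 m ≤ 31 := by
      have := (Nat.log2_lt hm0).mpr hm32
      omega
    have h1 : (2:Int) ^ Nat.log2 m ≤ n + 1 := by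
      have := Nat.log2_self_le hm0
      calc (2:Int) ^ Nat.log2 m = ((2 ^ Nat.log2 m : Nat) : Int) := by push_cast; ring
        _ ≤ (m : Int) := by exact_mod_cast this
        _ = n + 1 := hm
    have h2 : n + 1 < (2:Int) ^ (Nat.log2 m + 1) := by
      have := (Nat.log2_lt hm0).mp (Nat.lt_succ_self _)
      calc n + 1 = (m : Int) := hm.symm
        _ < ((2 ^ (Nat.log2 m + 1) : Nat) : Int) := by exact_mod_cast this
        _ = (2:Int) ^ (Nat.log2 m + 1) := by push_cast; ring
    have hmain := loop_reach n (Nat.log2 m) hj31 h1 h2 (Nat.log2 m) 0 0 (by omega)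
    rw [min_eq_right hj31]
    simpa using hmain
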